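-- pv_equiv track=rewrite | github.com/banboooo044/AtCoder | codefes_qualC/D.py | is_kaibun
-- ===== SOURCE A (Python) =====
-- def is_kaibun (S):
-- 	#戻り値が0:回文,1:回文無理
-- 	l = len(S)
-- 	S.sort()
--
-- 	i = 0
--
--
-- 	if l % 2 == 1:
-- 		sign = 0
--
-- 		while True:
-- 			if i >= l-1:
-- 				return 0
-- 			elif S[i] == S[i+1]:
-- 				i += 2
-- 			else:
-- 				if sign == 1:
-- 					return 1
-- 				else:
-- 					sign += 1
-- 					i += 1
--
-- 	else:
-- 		while True:
-- 			if i >= l-1: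
-- 				return 0
-- 			elif S[i] == S[i+1]:
-- 				i += 2
-- 			else:
-- 				return 1
-- ===== SOURCE B (Python) =====
-- def is_kaibun(S):
--     # 0: can be rearranged into a palindrome, 1: cannot.
--     # Keeps S.sort() so the caller-visible in-place mutation matches A.
--     S.sort()
--     counts = {}
--     for x in S:
--         counts[x] = counts.get(x, 0) + 1
--     odd = sum(v % 2 for v in counts.values())
--     return 0 if odd <= len(S) % 2 else 1
-- ===== Notes on version B (the rewrite author's own statement) =====
-- stated objective: simpler
-- what changed: A pairs equal neighbours of the sorted list with a stateful index walk and a one-mismatch 'sign' flag; B instead builds a count dictionary in one pass and returns 0 iff the number of values with odd multiplicity is at most len(S) % 2 (S.sort() is kept so the in-place mutation matches A).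
import Mathlib
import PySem

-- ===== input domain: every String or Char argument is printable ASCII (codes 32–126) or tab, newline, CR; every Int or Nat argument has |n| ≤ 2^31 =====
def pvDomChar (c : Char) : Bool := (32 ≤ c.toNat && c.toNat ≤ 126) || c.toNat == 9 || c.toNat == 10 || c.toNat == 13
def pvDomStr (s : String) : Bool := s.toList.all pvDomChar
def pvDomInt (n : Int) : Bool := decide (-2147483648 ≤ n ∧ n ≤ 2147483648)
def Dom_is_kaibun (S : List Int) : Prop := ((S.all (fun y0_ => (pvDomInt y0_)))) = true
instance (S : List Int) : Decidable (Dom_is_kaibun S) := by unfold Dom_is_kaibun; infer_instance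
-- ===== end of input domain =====

-- B replaces A's stateful pointer-walk over the sorted list by a counting dict and the
-- odd-multiplicity criterion (simpler decomposition, same cost). Both Pythons sort S in
-- place (same observable mutation); the equivalence proved here is about the RETURN value.

-- ===== PORT A =====
-- A's even-length while-loop: walk the sorted list pairing equal neighbours.
def pvA_even : List Int → Int
  | [] => 0
  | [_] => 0
  | a :: b :: rest => if a = b then pvA_even rest else 1

-- A's odd-length while-loop with its `sign` flag.
def pvA_odd : List Int → Int → Int
  | [], _ => 0
  | [_], _ => 0
  | a :: b :: rest, sign =>
    if a = b then pvA_odd rest sign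
    else if sign = 1 then 1 else pvA_odd (b :: rest) (sign + 1)

def is_kaibun (S : List Int) : Int :=
  let l : Int := S.length
  let T := PySem.List.sorted S (fun x => x) false   -- S.sort()
  if PySem.Int.mod l 2 = 1 then pvA_odd T 0 else pvA_even T

-- ===== PORT B =====
def is_kaibun_alt (S : List Int) : Int :=
  let T := PySem.List.sorted S (fun x => x) false   -- S.sort()
  let counts := T.foldl (fun d x => PySem.Dict.insert d x (PySem.Dict.getD d x 0 + 1)) PySem.Dict.empty
  let odd := (PySem.Dict.values counts).foldl (fun acc v => acc + PySem.Int.mod v 2) 0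
  if odd ≤ PySem.Int.mod (S.length : Int) 2 then 0 else 1

-- ===== PRECONDITION & SPEC =====
def Spec_is_kaibun (S : List Int) (out : Int) : Prop := out = is_kaibun_alt S
instance (S : List Int) (out : Int) : Decidable (Spec_is_kaibun S out) := by unfold Spec_is_kaibun; infer_instance

-- ===== CLAIM (what is proved, stated in full; the proofs are below) =====
def Claim_equal_is_kaibun : Prop := ∀ (S : List Int), Dom_is_kaibun S → Spec_is_kaibun S (is_kaibun S)

-- ===== LEMMAS AND PROOFS =====

theorem countP_discard (s : List Int) (a : Int) (p : Int → Bool) (hn : s.Nodup) (ha : a ∈ s) :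
    s.countP p = (PySem.Set.discard s a).countP p + (if p a then 1 else 0) := by
  have hperm : s.Perm (a :: PySem.Set.discard s a) := by
    rw [List.perm_ext_iff_of_nodup hn ?_]
    · intro x
      simp [PySem.Set.mem_discard]
      constructor
      · intro hx; by_cases hxa : x = a <;> simp [hxa, hx]
      · rintro (rfl | ⟨hx, _⟩) <;> assumption
    · refine List.Nodup.cons ?_ (PySem.Set.nodup_discard s a hn)
      simp [PySem.Set.mem_discard]
  rw [hperm.countP_eq, List.countP_cons]

theorem countP_discard_not_mem (s : List Int) (a : Int) (p : Int → Bool) (hn : s.Nodup) (ha : a ∉ s) :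
    (PySem.Set.discard s a).countP p = s.countP p := by
  have hperm : (PySem.Set.discard s a).Perm s := by
    rw [List.perm_ext_iff_of_nodup (PySem.Set.nodup_discard s a hn) hn]
    intro x
    simp [PySem.Set.mem_discard]
    intro hx; rintro rfl; exact ha hx
  exact hperm.countP_eq p

def oddCnt (T : List Int) : Nat :=
  (PySem.Set.ofList T).countP (fun k => decide (T.count k % 2 = 1))

theorem oddCnt_cons_not_mem (a : Int) (xs : List Int) (ha : a ∉ xs) :
    oddCnt (a :: xs) = 1 + oddCnt xs := by
  unfold oddCnt
  rw [PySem.Set.ofList_cons, List.countP_cons]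
  have h1 : ((a :: xs).count a) = 1 := by
    simp [List.count_eq_zero.2 ha]
  have h2 : (PySem.Set.discard (PySem.Set.ofList xs) a).countP
      (fun k => decide ((a :: xs).count k % 2 = 1))
      = (PySem.Set.ofList xs).countP (fun k => decide (xs.count k % 2 = 1)) := by
    rw [countP_discard_not_mem _ _ _ (PySem.Set.nodup_ofList xs)
      (by simp [PySem.Set.mem_ofList]; exact ha)]
    apply List.countP_congr
    intro k hk
    have hka : k ≠ a := by rintro rfl; exact ha ((PySem.Set.mem_ofList _ _).1 hk)
    simp [Ne.symm hka]
  rw [h2, h1]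
  simp
  omega

theorem countP_eq_of_nodup_mem (s t : List Int) (p : Int → Bool) (hs : s.Nodup) (ht : t.Nodup)
    (hmem : ∀ x, x ∈ s ↔ x ∈ t) : s.countP p = t.countP p :=
  ((List.perm_ext_iff_of_nodup hs ht).2 hmem).countP_eq p

theorem oddCnt_cons_cons (a : Int) (rest : List Int) :
    oddCnt (a :: a :: rest) = oddCnt rest := by
  unfold oddCnt
  have hcong : (PySem.Set.ofList (a :: a :: rest)).countP
        (fun k => decide ((a :: a :: rest).count k % 2 = 1))
      = (PySem.Set.ofList (a :: a :: rest)).countP (fun k => decide (rest.count k % 2 = 1)) := by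
    apply List.countP_congr
    intro k _
    by_cases hka : k = a <;> simp [List.count_cons, hka] <;> omega
  rw [hcong]
  by_cases ha : a ∈ rest
  · exact countP_eq_of_nodup_mem _ _ _ (PySem.Set.nodup_ofList _) (PySem.Set.nodup_ofList _)
      (by intro x; simp [PySem.Set.mem_ofList]; rintro rfl; exact ha)
  · have hmem : a ∈ PySem.Set.ofList (a :: a :: rest) := by simp [PySem.Set.mem_ofList]
    rw [countP_discard _ a _ (PySem.Set.nodup_ofList _) hmem]
    have hca : List.count a rest = 0 := List.count_eq_zero.2 ha
    simp only [hca, Nat.zero_mod, decide_eq_true_eq, if_neg (by omega : ¬ ((0:Nat) = 1)), Nat.add_zero]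
    exact countP_eq_of_nodup_mem _ _ _
      (PySem.Set.nodup_discard _ a (PySem.Set.nodup_ofList _)) (PySem.Set.nodup_ofList _)
      (by intro x
          simp only [PySem.Set.mem_discard, PySem.Set.mem_ofList, List.mem_cons]
          constructor
          · rintro ⟨(rfl | rfl | hx), hxa⟩ <;> first | exact absurd rfl hxa | exact hx
          · intro hx; exact ⟨Or.inr (Or.inr hx), by rintro rfl; exact ha hx⟩)

theorem pvA_odd_one (T : List Int) : pvA_odd T 1 = pvA_even T := by
  induction T using pvA_even.induct with
  | case1 => rfl
  | case2 => rfl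
  | case3 b rest ih => simpa [pvA_odd, pvA_even] using ih
  | case4 a b rest hab => simp [pvA_odd, pvA_even, hab]

theorem not_mem_tail_of_sorted (a b : Int) (rest : List Int)
    (hs : (a :: b :: rest).Pairwise (· ≤ ·)) (hab : a ≠ b) : a ∉ b :: rest := by
  have h1 : ∀ y ∈ b :: rest, a ≤ y := List.pairwise_cons.1 hs |>.1
  have h2 : ∀ y ∈ rest, b ≤ y := (List.pairwise_cons.1 (List.pairwise_cons.1 hs).2).1
  intro hmem
  rcases List.mem_cons.1 hmem with rfl | hmem'
  · exact hab rfl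
  · have hb : a ≤ b := h1 b (by simp)
    have : b ≤ a := h2 a hmem'
    exact hab (le_antisymm hb this)

theorem pvA_even_eq (T : List Int) (hs : T.Pairwise (· ≤ ·)) (hl : T.length % 2 = 0) :
    pvA_even T = if oddCnt T = 0 then 0 else 1 := by
  induction T using pvA_even.induct with
  | case1 => simp [pvA_even, oddCnt]
  | case2 x => simp at hl
  | case3 a rest ih =>
    rw [show pvA_even (a :: a :: rest) = pvA_even rest from by simp [pvA_even],
      oddCnt_cons_cons]
    exact ih (hs.sublist (by simp)) (by simp at hl ⊢; omega)
  | case4 a b rest hab =>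
    have hnm := not_mem_tail_of_sorted a b rest hs hab
    rw [show pvA_even (a :: b :: rest) = 1 from by simp [pvA_even, hab],
      oddCnt_cons_not_mem a _ hnm]
    simp

theorem pvA_odd_eq (T : List Int) (hs : T.Pairwise (· ≤ ·)) (hl : T.length % 2 = 1) :
    pvA_odd T 0 = if oddCnt T ≤ 1 then 0 else 1 := by
  induction T using pvA_even.induct with
  | case1 => simp at hl
  | case2 x =>
    have : oddCnt [x] = 1 := by
      rw [oddCnt_cons_not_mem x [] (by simp)]; rfl
    simp [pvA_odd, this]
  | case3 a rest ih =>
    rw [show pvA_odd (a :: a :: rest) 0 = pvA_odd rest 0 from by simp [pvA_odd],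
      oddCnt_cons_cons]
    exact ih (hs.sublist (by simp)) (by simp at hl ⊢; omega)
  | case4 a b rest hab =>
    have hnm := not_mem_tail_of_sorted a b rest hs hab
    have hstep : pvA_odd (a :: b :: rest) 0 = pvA_odd (b :: rest) 1 := by
      simp [pvA_odd, hab]
    rw [hstep, pvA_odd_one, oddCnt_cons_not_mem a _ hnm,
      pvA_even_eq (b :: rest) (hs.sublist (by simp)) (by simp at hl ⊢; omega)]
    by_cases h0 : oddCnt (b :: rest) = 0 <;> simp [h0]

theorem foldl_mod2 (T L : List Int) (a : Int) :
    (L.map (fun k => ((T.count k : Int)))).foldl (fun acc v => acc + PySem.Int.mod v 2) a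
      = a + (L.countP (fun k => decide (T.count k % 2 = 1)) : Int) := by
  induction L generalizing a with
  | nil => simp
  | cons c rest ih =>
    simp only [List.map_cons, List.foldl_cons, List.countP_cons, ih]
    rw [PySem.Int.mod_eq_emod_of_pos (by norm_num)]
    by_cases hc : T.count c % 2 = 1 <;> simp [hc] <;> omega

theorem alt_eq (S : List Int) :
    is_kaibun_alt S =
      if (oddCnt (PySem.List.sorted S (fun x => x) false) : Int)
          ≤ PySem.Int.mod (S.length : Int) 2 then 0 else 1 := by
  show (if (PySem.Dict.values ((PySem.List.sorted S (fun x => x) false).foldl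
        (fun d x => PySem.Dict.insert d x (PySem.Dict.getD d x 0 + 1)) PySem.Dict.empty)).foldl
        (fun acc v => acc + PySem.Int.mod v 2) 0 ≤ PySem.Int.mod (S.length : Int) 2 then 0 else 1) = _
  rw [PySem.Dict.foldl_insert_getD_add_one_eq_counter]
  have hv : (PySem.Dict.values (PySem.Dict.counter (PySem.List.sorted S (fun x => x) false)))
      = (PySem.Set.ofList (PySem.List.sorted S (fun x => x) false)).map
          (fun k => ((PySem.List.sorted S (fun x => x) false).count k : Int)) := by
    simp only [PySem.Dict.values, PySem.Dict.items_counter, List.map_map]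
    rfl
  rw [hv, foldl_mod2]
  simp [oddCnt]

theorem final (S : List Int) : is_kaibun S = is_kaibun_alt S := by
  have hmod : PySem.Int.mod (S.length : Int) 2 = ((S.length % 2 : Nat) : Int) := by
    exact_mod_cast PySem.Int.mod_natCast S.length 2
  have hlen : (PySem.List.sorted S (fun x => x) false).length = S.length :=
    PySem.List.length_sorted S _ _
  have hpw : (PySem.List.sorted S (fun x => x) false).Pairwise (fun a b => a ≤ b) :=
    PySem.List.sorted_pairwise S (fun x => x)
  rw [alt_eq]
  show (if PySem.Int.mod (S.length : Int) 2 = 1 then pvA_odd (PySem.List.sorted S (fun x => x) false) 0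
        else pvA_even (PySem.List.sorted S (fun x => x) false)) = _
  rw [hmod]
  by_cases hpar : S.length % 2 = 1
  · rw [hpar, if_pos (by norm_num),
      pvA_odd_eq _ hpw (by rw [hlen]; exact hpar)]
    by_cases h1 : oddCnt (PySem.List.sorted S (fun x => x) false) ≤ 1 <;>
      simp [h1]
  · have hpar0 : S.length % 2 = 0 := by omega
    rw [hpar0, if_neg (by norm_num),
      pvA_even_eq _ hpw (by rw [hlen]; exact hpar0)]
    by_cases h1 : oddCnt (PySem.List.sorted S (fun x => x) false) = 0 <;>
      simp [h1]

-- ===== VERDICT (by name: the statement is the Claim_ definition above) =====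
theorem is_kaibun_spec : Claim_equal_is_kaibun := by
  intro S _
  unfold Spec_is_kaibun
  exact final S
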